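-- pv_equiv track=rewrite | github.com/khalidzahra/Algorithms-and-Data-Structures-training---IEEE-CS-ZSB | CS21-Science-Day-2/ksenia_and_pan_scales.py | balance_scale
-- ===== SOURCE A (Python) =====
-- def balance_scale(left_side, right_side, disposal):
--     while len(disposal) > 0:
--         if len(left_side) < len(right_side):
--             left_side += disposal[-1]
--         else:
--             right_side += disposal[-1]
--         disposal = disposal[:-1]
--     return left_side + "|" + right_side if len(left_side) == len(right_side) else "Impossible"
-- ===== SOURCE B (Python) =====
-- def balance_scale(left_side, right_side, disposal):
--     rev = disposal[::-1]
--     L, R = len(left_side), len(right_side)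
--     t = min(len(rev), R - L) if L < R else min(len(rev), L - R)
--     head, rest = rev[:t], rev[t:]
--     to_right = rest[0::2]
--     to_left = rest[1::2]
--     if L < R:
--         left, right = left_side + head + to_left, right_side + to_right
--     else:
--         left, right = left_side + to_left, right_side + head + to_right
--     return left + "|" + right if len(left) == len(right) else "Impossible"
-- ===== Notes on version B (the rewrite author's own statement) =====
-- stated objective: faster
-- what changed: Replaces the O(n^2) while-loop (which re-slices disposal[:-1] each iteration and compares lengths every step) by a closed form: reverse disposal once, send the first min(|d|,|len diff|) characters to the shorter side, then split the remainder by parity of position between the two sides with stride slices.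
import Mathlib
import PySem

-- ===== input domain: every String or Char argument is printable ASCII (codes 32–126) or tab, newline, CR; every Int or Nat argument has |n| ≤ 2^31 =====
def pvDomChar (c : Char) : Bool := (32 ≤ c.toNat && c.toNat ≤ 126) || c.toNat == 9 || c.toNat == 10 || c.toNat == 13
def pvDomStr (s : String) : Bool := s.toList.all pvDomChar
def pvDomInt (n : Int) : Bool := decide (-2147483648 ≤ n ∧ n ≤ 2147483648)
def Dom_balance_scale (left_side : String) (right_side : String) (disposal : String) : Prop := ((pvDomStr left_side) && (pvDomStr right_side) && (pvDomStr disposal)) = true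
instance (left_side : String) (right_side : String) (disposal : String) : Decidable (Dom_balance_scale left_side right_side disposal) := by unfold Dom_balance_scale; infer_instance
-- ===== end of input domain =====

-- B replaces A's quadratic while-loop by an O(n) closed form (reverse once, slice); objective: faster.

-- ===== PORT A =====
-- the while loop: disposal[-1] on a nonempty string is its last character,
-- disposal[:-1] is dropLast (PySem.List.slice_to_neg_one)
def loopA (l r d : List Char) : List Char × List Char :=
  match d with
  | [] => (l, r)
  | a :: t =>
    if l.length < r.length then
      loopA (l ++ [(a :: t).getLast (by simp)]) r (a :: t).dropLast
    else
      loopA l (r ++ [(a :: t).getLast (by simp)]) (a :: t).dropLast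
termination_by d.length
decreasing_by all_goals simp

def balance_scale (left_side : String) (right_side : String) (disposal : String) : String :=
  let p := loopA left_side.toList right_side.toList disposal.toList
  if p.1.length = p.2.length then String.ofList (p.1 ++ ['|'] ++ p.2) else "Impossible"

-- ===== PORT B =====
-- hand port of the step-2 slices rest[0::2] (= stride2 rest) and rest[1::2] (= stride2 rest.tail):
-- exact: selects every second element starting at position 0 / 1.
def stride2 {α : Type} : List α → List α
  | [] => []
  | [a] => [a]
  | a :: _ :: t => a :: stride2 t

def balance_scale_alt (left_side : String) (right_side : String) (disposal : String) : String :=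
  let rev := disposal.toList.reverse          -- disposal[::-1]
  let L := left_side.toList.length
  let R := right_side.toList.length
  let t := if L < R then min rev.length (R - L) else min rev.length (L - R)
  let head := rev.take t                      -- rev[:t]
  let rest := rev.drop t                      -- rev[t:]
  let to_right := stride2 rest                -- rest[0::2]
  let to_left := stride2 rest.tail            -- rest[1::2]
  let p :=
    if L < R then (left_side.toList ++ head ++ to_left, right_side.toList ++ to_right)
    else (left_side.toList ++ to_left, right_side.toList ++ head ++ to_right)
  if p.1.length = p.2.length then String.ofList (p.1 ++ ['|'] ++ p.2) else "Impossible"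

-- ===== PRECONDITION & SPEC =====
def Spec_balance_scale (left_side : String) (right_side : String) (disposal : String) (out : String) : Prop := out = balance_scale_alt left_side right_side disposal
instance (left_side : String) (right_side : String) (disposal : String) (out : String) : Decidable (Spec_balance_scale left_side right_side disposal out) := by unfold Spec_balance_scale; infer_instance

-- ===== CLAIM (what is proved, stated in full; the proofs are below) =====
def Claim_equal_balance_scale : Prop := ∀ (left_side : String) (right_side : String) (disposal : String), Dom_balance_scale left_side right_side disposal → Spec_balance_scale left_side right_side disposal (balance_scale left_side right_side disposal)

-- ===== LEMMAS AND PROOFS =====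

-- front-to-back version of A's loop (A consumes disposal from the end)
def loopF (l r e : List Char) : List Char × List Char :=
  match e with
  | [] => (l, r)
  | c :: e' =>
    if l.length < r.length then loopF (l ++ [c]) r e' else loopF l (r ++ [c]) e'

theorem loopA_ne (l r : List Char) (d : List Char) (h : d ≠ []) :
    loopA l r d = if l.length < r.length then loopA (l ++ [d.getLast h]) r d.dropLast
                  else loopA l (r ++ [d.getLast h]) d.dropLast := by
  cases d with
  | nil => exact absurd rfl h
  | cons a t => rw [loopA]

theorem loopF_eq_loopA_reverse (e : List Char) : ∀ l r, loopF l r e = loopA l r e.reverse := by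
  induction e with
  | nil => intro l r; simp [loopF, loopA]
  | cons c e' ih =>
    intro l r
    rw [show (c :: e').reverse = e'.reverse ++ [c] by simp,
        loopA_ne _ _ _ (by simp), loopF]
    simp only [List.getLast_concat, List.dropLast_concat]
    split <;> rw [ih]

theorem stride2_cons {α : Type} (a : α) (t : List α) : stride2 (a :: t) = a :: stride2 t.tail := by
  cases t <;> simp [stride2]

theorem stride2_tail_cons {α : Type} (a : α) (t : List α) : stride2 (a :: t).tail = stride2 t := rfl

-- main characterisation of loopF: the first (length difference) characters go to the
-- shorter side, the remainder alternates starting with the right side.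
theorem loopF_closed (n : Nat) : ∀ (e : List Char), e.length ≤ n → ∀ (l r : List Char),
    (l.length < r.length →
      loopF l r e = (l ++ e.take (r.length - l.length) ++ stride2 (e.drop (r.length - l.length)).tail,
                     r ++ stride2 (e.drop (r.length - l.length)))) ∧
    (r.length ≤ l.length →
      loopF l r e = (l ++ stride2 (e.drop (l.length - r.length)).tail,
                     r ++ e.take (l.length - r.length) ++ stride2 (e.drop (l.length - r.length)))) := by

  induction n with
  | zero =>
    intro e he l r
    have : e = [] := List.length_eq_zero_iff.mp (Nat.le_zero.mp he)
    subst this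
    constructor <;> intro _ <;> simp [loopF, stride2]
  | succ n ih =>
    intro e he l r
    cases e with
    | nil => constructor <;> intro _ <;> simp [loopF, stride2]
    | cons c e' =>
      have he' : e'.length ≤ n := by simpa using he
      constructor
      · -- l shorter: char goes left
        intro hlt
        have hk : 1 ≤ r.length - l.length := by omega
        rw [loopF, if_pos hlt]
        rcases Nat.lt_or_ge (l.length + 1) r.length with h2 | h2
        · -- still shorter: IH part 1
          have := (ih e' he' (l ++ [c]) r).1 (by simpa using h2)
          rw [this]
          have hkk : r.length - (l ++ [c]).length = (r.length - l.length) - 1 := by simp; omega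
          obtain ⟨k, hk'⟩ : ∃ k, r.length - l.length = k + 1 := ⟨r.length - l.length - 1, by omega⟩
          have h3 : r.length - (l.length + 1) = k := by omega
          simp [hk', h3, List.take_succ_cons, List.drop_succ_cons]
        · -- lengths now equal: IH part 2 with diff 0
          have heq : (l ++ [c]).length = r.length := by simp; omega
          have := (ih e' he' (l ++ [c]) r).2 (by omega)
          rw [this]
          have h0 : (l ++ [c]).length - r.length = 0 := by omega
          have h1 : r.length - l.length = 1 := by simp at heq; omega
          have h3 : l.length + 1 - r.length = 0 := by simp at heq; omega
          simp [h1, h3, List.take_succ_cons, List.drop_succ_cons]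
      · -- r ≤ l: char goes right
        intro hle
        rw [loopF, if_neg (by omega)]
        rcases Nat.eq_or_lt_of_le hle with h2 | h2
        · -- equal lengths: after the step l is shorter by 1
          have := (ih e' he' l (r ++ [c])).1 (by simp; omega)
          rw [this]
          have hk1 : (r ++ [c]).length - l.length = 1 := by simp; omega
          have h0 : l.length - r.length = 0 := by omega
          rw [hk1, h0]
          simp only [List.drop_zero, List.take_zero, stride2_tail_cons,
            stride2_cons, List.take_one, List.drop_one]
          cases e' with
          | nil => simp [stride2]
          | cons b t => simp [stride2_cons, List.append_assoc]
        · -- r strictly shorter: IH part 2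
          have := (ih e' he' l (r ++ [c])).2 (by simp; omega)
          rw [this]
          have hkk : l.length - (r ++ [c]).length = (l.length - r.length) - 1 := by simp; omega
          obtain ⟨k, hk'⟩ : ∃ k, l.length - r.length = k + 1 := ⟨l.length - r.length - 1, by omega⟩
          have h3 : l.length - (r.length + 1) = k := by omega
          simp [hk', h3, List.take_succ_cons, List.drop_succ_cons]

theorem take_min_length {α : Type} (xs : List α) (k : Nat) : xs.take (min xs.length k) = xs.take k := by
  rcases Nat.le_total xs.length k with h | h
  · simp [Nat.min_eq_left h, List.take_of_length_le h]
  · simp [Nat.min_eq_right h]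

theorem drop_min_length {α : Type} (xs : List α) (k : Nat) : xs.drop (min xs.length k) = xs.drop k := by
  rcases Nat.le_total xs.length k with h | h
  · simp [Nat.min_eq_left h, List.drop_of_length_le h]
  · simp [Nat.min_eq_right h]

theorem loopA_closed (l r d : List Char) :
    loopA l r d =
      (if l.length < r.length
        then (l ++ d.reverse.take (r.length - l.length) ++ stride2 (d.reverse.drop (r.length - l.length)).tail,
              r ++ stride2 (d.reverse.drop (r.length - l.length)))
        else (l ++ stride2 (d.reverse.drop (l.length - r.length)).tail,
              r ++ d.reverse.take (l.length - r.length) ++ stride2 (d.reverse.drop (l.length - r.length)))) := by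
  have h1 : loopA l r d = loopF l r d.reverse := by
    rw [loopF_eq_loopA_reverse, List.reverse_reverse]
  rw [h1]
  rcases Nat.lt_or_ge l.length r.length with h | h
  · rw [if_pos h]
    exact (loopF_closed d.reverse.length d.reverse le_rfl l r).1 h
  · rw [if_neg (by omega)]
    exact (loopF_closed d.reverse.length d.reverse le_rfl l r).2 h

-- ===== VERDICT (by name: the statement is the Claim_ definition above) =====
theorem balance_scale_spec : Claim_equal_balance_scale := by
  intro left_side right_side disposal _
  unfold Spec_balance_scale balance_scale balance_scale_alt
  rw [loopA_closed]
  by_cases h : left_side.toList.length < right_side.toList.length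
  · simp only [if_pos h, take_min_length, drop_min_length]
  · simp only [if_neg h, take_min_length, drop_min_length]
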